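-- pv_equiv track=rewrite | github.com/DaniDelHoyo/TFG-Code | train_dyer.py | calc_Ps
-- ===== SOURCE A (Python) =====
-- def calc_Ps(anot_dic, d,e):
--     '''Return:
--         pd=number of proteins with domain d
--         pe=number of proteins with domain e
--         pde=number of proteins with both domains
--
--     '''
--     pd,pe,pde=0,0,0
--     for prot in anot_dic:
--         ese=False
--         if d in anot_dic[prot]:
--             pd+=1
--             ese=True
--         if e in anot_dic[prot]:
--             pe+=1
--             if ese:
--                 pde+=1
--     return pd,pe,pde
-- ===== SOURCE B (Python) =====
-- def calc_Ps(anot_dic, d, e):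
--     '''Return:
--         pd=number of proteins with domain d
--         pe=number of proteins with domain e
--         pde=number of proteins with both domains
--     '''
--     vals = list(anot_dic.values())
--     pd = sum(1 for doms in vals if d in doms)
--     pe = sum(1 for doms in vals if e in doms)
--     pde = sum(1 for doms in vals if d in doms and e in doms)
--     return pd, pe, pde
-- ===== Notes on version B (the rewrite author's own statement) =====
-- stated objective: simpler
-- what changed: Replaces the single stateful loop with its ese flag by three independent one-condition counts over the dict's values (domain d, domain e, both), so no per-iteration flag or key lookup is needed.
import Mathlib
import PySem

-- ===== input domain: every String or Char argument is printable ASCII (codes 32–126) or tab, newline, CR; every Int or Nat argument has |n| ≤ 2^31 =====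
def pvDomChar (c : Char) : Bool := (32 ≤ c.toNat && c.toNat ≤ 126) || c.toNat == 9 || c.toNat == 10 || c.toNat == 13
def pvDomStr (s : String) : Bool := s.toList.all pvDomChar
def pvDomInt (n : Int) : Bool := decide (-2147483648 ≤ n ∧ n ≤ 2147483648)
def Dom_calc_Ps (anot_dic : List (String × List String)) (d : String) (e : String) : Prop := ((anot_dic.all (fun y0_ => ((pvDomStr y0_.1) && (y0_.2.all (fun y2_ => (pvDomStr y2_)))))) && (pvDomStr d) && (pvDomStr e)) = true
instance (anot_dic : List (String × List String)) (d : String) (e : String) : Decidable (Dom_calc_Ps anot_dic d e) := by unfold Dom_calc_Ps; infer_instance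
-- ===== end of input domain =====

-- B replaces A's single stateful loop (with its ese flag and per-key dict lookup)
-- by three independent one-condition counts over the dict's values: simpler decomposition, same cost.


-- ===== PORT A =====
-- anot_dic[prot]: dict lookup (first match; Pre_ guarantees unique keys, as in a Python dict)
def pvLookup (anot_dic : List (String × List String)) (k : String) : List String :=
  (PySem.Dict.mk anot_dic).getD k []

def calc_Ps (anot_dic : List (String × List String)) (d : String) (e : String) : Int × Int × Int :=
  -- for prot in anot_dic: iterates the keys; state (pd, pe, pde) with the per-iteration ese flag
  (anot_dic.map Prod.fst).foldl
    (fun acc prot =>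
      let doms := pvLookup anot_dic prot
      let ese := false
      let pd' := if doms.contains d then acc.1 + 1 else acc.1
      let ese' := if doms.contains d then true else ese
      if doms.contains e then
        (pd', acc.2.1 + 1, if ese' then acc.2.2 + 1 else acc.2.2)
      else
        (pd', acc.2.1, acc.2.2))
    (0, 0, 0)

-- ===== PORT B =====
def calc_Ps_alt (anot_dic : List (String × List String)) (d : String) (e : String) : Int × Int × Int :=
  let vals := anot_dic.map Prod.snd
  ((vals.countP (fun doms => doms.contains d) : Int),
   (vals.countP (fun doms => doms.contains e) : Int),
   (vals.countP (fun doms => doms.contains d && doms.contains e) : Int))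

-- ===== PRECONDITION & SPEC =====
-- Pre_ requires the association list's keys to be distinct: a Python dict cannot hold
-- duplicate keys, so only such lists represent an input A ever receives.
def Pre_calc_Ps (anot_dic : List (String × List String)) (d : String) (e : String) : Prop :=
  (anot_dic.map Prod.fst).Nodup
instance (anot_dic : List (String × List String)) (d : String) (e : String) : Decidable (Pre_calc_Ps anot_dic d e) := by unfold Pre_calc_Ps; infer_instance

def pvWitness_calc_Ps : (List (String × List String)) × String × String :=
  ([("p1", ["x", "y"]), ("p2", ["y"]), ("p3", [])], "x", "y")

def Spec_calc_Ps (anot_dic : List (String × List String)) (d : String) (e : String) (out : Int × Int × Int) : Prop := out = calc_Ps_alt anot_dic d e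
instance (anot_dic : List (String × List String)) (d : String) (e : String) (out : Int × Int × Int) : Decidable (Spec_calc_Ps anot_dic d e out) := by unfold Spec_calc_Ps; infer_instance

-- ===== CLAIM (what is proved, stated in full; the proofs are below) =====
def Claim_equal_calc_Ps : Prop := ∀ (anot_dic : List (String × List String)) (d : String) (e : String), Dom_calc_Ps anot_dic d e → Pre_calc_Ps anot_dic d e → Spec_calc_Ps anot_dic d e (calc_Ps anot_dic d e)

-- ===== LEMMAS AND PROOFS =====

-- With distinct keys, looking up a member pair's key returns that pair's value.
theorem pvLookup_mem (anot_dic : List (String × List String))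
    (h : (anot_dic.map Prod.fst).Nodup) (p : String × List String) (hp : p ∈ anot_dic) :
    pvLookup anot_dic p.1 = p.2 := by
  induction anot_dic with
  | nil => cases hp
  | cons q rest ih =>
    simp only [List.map_cons, List.nodup_cons] at h
    obtain ⟨k, v⟩ := q
    rcases List.mem_cons.mp hp with rfl | hm
    · simp [pvLookup, PySem.Dict.getD, PySem.Dict.get?_mk_cons]
    · have hne : k ≠ p.1 := by
        intro hEq
        exact h.1 (hEq ▸ List.mem_map.mpr ⟨p, hm, rfl⟩)
      have := ih h.2 hm
      simpa [pvLookup, PySem.Dict.getD, PySem.Dict.get?_mk_cons, hne] using this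

-- The fold over a sublist l of L, with each key looked up in L where it resolves to the
-- pair's own value, equals the three counts over l's values.
theorem fold_counts (L l : List (String × List String)) (d e : String)
    (hsub : ∀ p ∈ l, pvLookup L p.1 = p.2) (a b c : Int) :
    l.foldl
      (fun acc (p : String × List String) =>
        let doms := pvLookup L p.1
        let ese := false
        let pd' := if doms.contains d then acc.1 + 1 else acc.1
        let ese' := if doms.contains d then true else ese
        if doms.contains e then
          (pd', acc.2.1 + 1, if ese' then acc.2.2 + 1 else acc.2.2)
        else
          (pd', acc.2.1, acc.2.2))
      (a, b, c)
    = (a + ((l.map Prod.snd).countP (fun doms => doms.contains d) : Int),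
       b + ((l.map Prod.snd).countP (fun doms => doms.contains e) : Int),
       c + ((l.map Prod.snd).countP (fun doms => doms.contains d && doms.contains e) : Int)) := by
  induction l generalizing a b c with
  | nil => simp
  | cons p rest ih =>
    have hp : pvLookup L p.1 = p.2 := hsub p (List.mem_cons_self ..)
    have hrest : ∀ q ∈ rest, pvLookup L q.1 = q.2 := fun q hq => hsub q (List.mem_cons_of_mem _ hq)
    simp only [List.foldl_cons, List.map_cons, List.countP_cons, hp]
    by_cases hd : p.2.contains d = true <;> by_cases he : p.2.contains e = true <;>
      simp only [hd, he, if_true, Bool.true_and, Bool.false_and, ih hrest] <;>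
        push_cast <;> ring_nf <;> simp [Prod.ext_iff] <;> omega

theorem calc_Ps_eq (anot_dic : List (String × List String)) (d e : String)
    (h : (anot_dic.map Prod.fst).Nodup) :
    calc_Ps anot_dic d e = calc_Ps_alt anot_dic d e := by
  unfold calc_Ps calc_Ps_alt
  rw [List.foldl_map]
  rw [fold_counts anot_dic anot_dic d e (fun p hp => pvLookup_mem anot_dic h p hp)]
  simp

-- ===== VERDICT (by name: the statement is the Claim_ definition above) =====
theorem calc_Ps_spec : Claim_equal_calc_Ps := by
  intro anot_dic d e _ hpre
  exact calc_Ps_eq anot_dic d e hpre
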